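-- pv_equiv track=rewrite | github.com/skh/ukrainian | backend/app/routers/verb_forms.py | _decode_tags
-- ===== SOURCE A (Python) =====
-- _TENSES  = {"present", "future", "past", "imperative"}
--
-- _PERSONS = {"1", "2", "3"}
--
-- _NUMBERS = {"singular", "plural"}
--
-- _GENDERS = {"masculine", "feminine", "neuter"}
--
-- def _decode_tags(tags: str) -> dict:
--     parts = tags.split(",")
--     return {
--         "tense":  next((p for p in parts if p in _TENSES),  None),
--         "person": next((p for p in parts if p in _PERSONS), None),
--         "number": next((p for p in parts if p in _NUMBERS), None),
--         "gender": next((p for p in parts if p in _GENDERS), None),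
--     }
-- ===== SOURCE B (Python) =====
-- _FIELD_OF = {
--     "present": "tense", "future": "tense", "past": "tense", "imperative": "tense",
--     "1": "person", "2": "person", "3": "person",
--     "singular": "number", "plural": "number",
--     "masculine": "gender", "feminine": "gender", "neuter": "gender",
-- }
--
-- def _decode_tags(tags: str) -> dict:
--     result = {"tense": None, "person": None, "number": None, "gender": None}
--     for p in tags.split(","):
--         field = _FIELD_OF.get(p)
--         if field is not None and result[field] is None:
--             result[field] = p
--     return result
-- ===== Notes on version B (the rewrite author's own statement) =====
-- stated objective: idiomatic
-- what changed: Replaces A's four separate generator scans over the split parts with one inverted tag->field lookup table and a single first-wins pass that fills a pre-initialised result dict.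
import Mathlib
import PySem

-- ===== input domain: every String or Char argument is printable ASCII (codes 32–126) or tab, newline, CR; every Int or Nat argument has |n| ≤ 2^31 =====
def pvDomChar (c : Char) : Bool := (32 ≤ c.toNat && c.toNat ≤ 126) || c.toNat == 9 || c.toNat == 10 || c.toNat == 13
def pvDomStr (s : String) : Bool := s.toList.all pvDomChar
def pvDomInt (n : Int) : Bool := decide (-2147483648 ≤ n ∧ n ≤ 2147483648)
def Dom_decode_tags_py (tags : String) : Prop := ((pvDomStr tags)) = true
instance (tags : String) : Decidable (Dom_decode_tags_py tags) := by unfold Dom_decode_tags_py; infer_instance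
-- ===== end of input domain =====

-- B replaces A's four generator scans over the parts with one inverted tag→field
-- lookup table and a single first-wins pass over the parts (objective: idiomatic).

-- ===== PORT A =====
def pvTenses : PySem.Set String := PySem.Set.ofList ["present", "future", "past", "imperative"]
def pvPersons : PySem.Set String := PySem.Set.ofList ["1", "2", "3"]
def pvNumbers : PySem.Set String := PySem.Set.ofList ["singular", "plural"]
def pvGenders : PySem.Set String := PySem.Set.ofList ["masculine", "feminine", "neuter"]

def decode_tags_py (tags : String) : List (String × Option String) :=
  let parts := (PySem.Str.split? tags ",").getD []   -- sep "," ≠ "", so split? is always `some`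
  [("tense",  parts.find? (fun p => PySem.Set.contains pvTenses p)),
   ("person", parts.find? (fun p => PySem.Set.contains pvPersons p)),
   ("number", parts.find? (fun p => PySem.Set.contains pvNumbers p)),
   ("gender", parts.find? (fun p => PySem.Set.contains pvGenders p))]

-- ===== PORT B =====
def pvFieldOf : PySem.Dict String String := PySem.Dict.ofList
  [("present", "tense"), ("future", "tense"), ("past", "tense"), ("imperative", "tense"),
   ("1", "person"), ("2", "person"), ("3", "person"),
   ("singular", "number"), ("plural", "number"),
   ("masculine", "gender"), ("feminine", "gender"), ("neuter", "gender")]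

def pvStep (res : PySem.Dict String (Option String)) (p : String) :
    PySem.Dict String (Option String) :=
  match pvFieldOf.get? p with
  | some field => if res.getD field none = none then res.insert field (some p) else res
  | none => res

def decode_tags_py_alt (tags : String) : List (String × Option String) :=
  (((PySem.Str.split? tags ",").getD []).foldl pvStep
    (PySem.Dict.ofList [("tense", none), ("person", none), ("number", none), ("gender", none)])).items

-- ===== PRECONDITION & SPEC =====
def Spec_decode_tags_py (tags : String) (out : List (String × Option String)) : Prop := out = decode_tags_py_alt tags
instance (tags : String) (out : List (String × Option String)) : Decidable (Spec_decode_tags_py tags out) := by unfold Spec_decode_tags_py; infer_instance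

-- ===== CLAIM (what is proved, stated in full; the proofs are below) =====
def Claim_equal_decode_tags_py : Prop := ∀ (tags : String), Dom_decode_tags_py tags → Spec_decode_tags_py tags (decode_tags_py tags)

-- ===== LEMMAS AND PROOFS =====

/-- "first-wins" combination: the already-chosen value, else the first member of `s` in `parts`. -/
def pvOFind (o : Option String) (parts : List String) (s : PySem.Set String) : Option String :=
  match o with
  | some v => some v
  | none => parts.find? (fun p => PySem.Set.contains s p)

theorem pvFieldOf_mk : pvFieldOf = PySem.Dict.mk
  [("present", "tense"), ("future", "tense"), ("past", "tense"), ("imperative", "tense"),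
   ("1", "person"), ("2", "person"), ("3", "person"),
   ("singular", "number"), ("plural", "number"),
   ("masculine", "gender"), ("feminine", "gender"), ("neuter", "gender")] := by decide

/-- Every string is either one of the twelve tag words (then the inverted table hits exactly
    its category set) or none of them (then the table misses and all four sets miss). -/
theorem pvClassify (p : String) :
    (pvFieldOf.get? p = some "tense" ∧ PySem.Set.contains pvTenses p = true ∧
      PySem.Set.contains pvPersons p = false ∧ PySem.Set.contains pvNumbers p = false ∧
      PySem.Set.contains pvGenders p = false)
  ∨ (pvFieldOf.get? p = some "person" ∧ PySem.Set.contains pvTenses p = false ∧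
      PySem.Set.contains pvPersons p = true ∧ PySem.Set.contains pvNumbers p = false ∧
      PySem.Set.contains pvGenders p = false)
  ∨ (pvFieldOf.get? p = some "number" ∧ PySem.Set.contains pvTenses p = false ∧
      PySem.Set.contains pvPersons p = false ∧ PySem.Set.contains pvNumbers p = true ∧
      PySem.Set.contains pvGenders p = false)
  ∨ (pvFieldOf.get? p = some "gender" ∧ PySem.Set.contains pvTenses p = false ∧
      PySem.Set.contains pvPersons p = false ∧ PySem.Set.contains pvNumbers p = false ∧
      PySem.Set.contains pvGenders p = true)
  ∨ (pvFieldOf.get? p = none ∧ PySem.Set.contains pvTenses p = false ∧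
      PySem.Set.contains pvPersons p = false ∧ PySem.Set.contains pvNumbers p = false ∧
      PySem.Set.contains pvGenders p = false) := by
  by_cases h1 : p = "present"; · subst h1; left; decide
  by_cases h2 : p = "future"; · subst h2; left; decide
  by_cases h3 : p = "past"; · subst h3; left; decide
  by_cases h4 : p = "imperative"; · subst h4; left; decide
  by_cases h5 : p = "1"; · subst h5; right; left; decide
  by_cases h6 : p = "2"; · subst h6; right; left; decide
  by_cases h7 : p = "3"; · subst h7; right; left; decide
  by_cases h8 : p = "singular"; · subst h8; right; right; left; decide
  by_cases h9 : p = "plural"; · subst h9; right; right; left; decide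
  by_cases h10 : p = "masculine"; · subst h10; right; right; right; left; decide
  by_cases h11 : p = "feminine"; · subst h11; right; right; right; left; decide
  by_cases h12 : p = "neuter"; · subst h12; right; right; right; left; decide
  right; right; right; right
  refine ⟨?_, ?_, ?_, ?_, ?_⟩
  · simp [pvFieldOf_mk, PySem.Dict.get?, Ne.symm h1, Ne.symm h2, Ne.symm h3, Ne.symm h4,
          Ne.symm h5, Ne.symm h6, Ne.symm h7, Ne.symm h8, Ne.symm h9, Ne.symm h10,
          Ne.symm h11, Ne.symm h12]
  · simp [pvTenses, PySem.Set.contains, PySem.Set.ofList]; exact ⟨h1, h2, h3, h4⟩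
  · simp [pvPersons, PySem.Set.contains, PySem.Set.ofList]; exact ⟨h5, h6, h7⟩
  · simp [pvNumbers, PySem.Set.contains, PySem.Set.ofList]; exact ⟨h8, h9⟩
  · simp [pvGenders, PySem.Set.contains, PySem.Set.ofList]; exact ⟨h10, h11, h12⟩

theorem pvFold_items (parts : List String) (t pe n g : Option String) :
    (parts.foldl pvStep
      (PySem.Dict.mk [("tense", t), ("person", pe), ("number", n), ("gender", g)])).items
    = [("tense", pvOFind t parts pvTenses), ("person", pvOFind pe parts pvPersons),
       ("number", pvOFind n parts pvNumbers), ("gender", pvOFind g parts pvGenders)] := by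
  induction parts generalizing t pe n g with
  | nil => cases t <;> cases pe <;> cases n <;> cases g <;> simp [pvOFind]
  | cons p rest ih =>
    rcases pvClassify p with ⟨hf, c1, c2, c3, c4⟩ | ⟨hf, c1, c2, c3, c4⟩ |
      ⟨hf, c1, c2, c3, c4⟩ | ⟨hf, c1, c2, c3, c4⟩ | ⟨hf, c1, c2, c3, c4⟩ <;>
      simp only [List.foldl_cons, pvStep, hf] <;>
      simp [PySem.Set.contains] at c1 c2 c3 c4
    · cases t <;> simp [PySem.Dict.getD, PySem.Dict.get?, PySem.Dict.insert, ih, pvOFind,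
        List.find?, c1, c2, c3, c4]
    · cases pe <;> simp [PySem.Dict.getD, PySem.Dict.get?, PySem.Dict.insert, ih, pvOFind,
        List.find?, c1, c2, c3, c4]
    · cases n <;> simp [PySem.Dict.getD, PySem.Dict.get?, PySem.Dict.insert, ih, pvOFind,
        List.find?, c1, c2, c3, c4]
    · cases g <;> simp [PySem.Dict.getD, PySem.Dict.get?, PySem.Dict.insert, ih, pvOFind,
        List.find?, c1, c2, c3, c4]
    · simp [ih, pvOFind, List.find?, c1, c2, c3, c4]

-- ===== VERDICT (by name: the statement is the Claim_ definition above) =====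
theorem decode_tags_py_spec : Claim_equal_decode_tags_py := by
  intro tags _
  unfold Spec_decode_tags_py decode_tags_py decode_tags_py_alt
  rw [show (PySem.Dict.ofList [("tense", (none : Option String)), ("person", none), ("number", none), ("gender", none)])
        = PySem.Dict.mk [("tense", none), ("person", none), ("number", none), ("gender", none)] from rfl,
      pvFold_items]
  rfl
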